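-- pv_equiv track=rewrite | github.com/yukioishi-eng/python-practice | basics/find_top_students.py | find_special_students
-- ===== SOURCE A (Python) =====
-- def find_special_students(scores):
--     max_score = scores[next(iter(scores))]
--     for name, score in scores.items():
--         if score > max_score:
--             max_score = score
--     if max_score < 60:
--         return []
--
--     #先に最高得点を求めて最高得点と同じ得点の人の名前をリストに入れる
--     max_students = []
--     for name, score in scores.items():
--         if score == max_score:
--             max_students.append(name)
--     return max_students
-- ===== SOURCE B (Python) =====
-- def find_special_students(scores):
--     it = iter(scores.items())
--     first_name, max_score = next(it)
--     max_students = [first_name]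
--     for name, score in it:
--         if score > max_score:
--             max_score = score
--             max_students = [name]
--         elif score == max_score:
--             max_students.append(name)
--     return [] if max_score < 60 else max_students
-- ===== Notes on version B (the rewrite author's own statement) =====
-- stated objective: alternative
-- what changed: Replaces A's two full scans (one to find the max, one to collect matching names) by a single pass that maintains the running max and the list of names attaining it together.
import Mathlib
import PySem

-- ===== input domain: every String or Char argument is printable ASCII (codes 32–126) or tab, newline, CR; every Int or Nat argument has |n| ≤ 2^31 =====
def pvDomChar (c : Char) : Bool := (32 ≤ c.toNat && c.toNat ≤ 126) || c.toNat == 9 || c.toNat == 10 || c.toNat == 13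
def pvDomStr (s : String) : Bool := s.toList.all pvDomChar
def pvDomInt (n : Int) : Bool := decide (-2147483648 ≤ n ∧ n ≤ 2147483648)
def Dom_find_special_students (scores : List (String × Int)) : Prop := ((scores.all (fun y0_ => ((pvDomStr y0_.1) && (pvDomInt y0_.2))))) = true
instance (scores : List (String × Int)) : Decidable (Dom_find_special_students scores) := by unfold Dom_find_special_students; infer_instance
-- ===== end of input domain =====

-- B replaces A's two full scans (max then collect) by one pass maintaining the max and its name list together (alternative decomposition, same cost).


-- ===== PORT A =====
-- max_score = scores[next(iter(scores))]; then one pass maximising, then one pass collecting names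
def find_special_students (scores : List (String × Int)) : List String :=
  match scores with
  | [] => []   -- unreachable: Python raises StopIteration here, excluded by Pre_
  | (n0, _) :: _ =>
    let m0 := (scores.lookup n0).getD 0   -- scores[first key]: first-match lookup, exact for a dict assoc list
    let max_score := scores.foldl (fun mx p => if p.2 > mx then p.2 else mx) m0
    if max_score < 60 then []
    else scores.foldl (fun acc p => if p.2 == max_score then acc ++ [p.1] else acc) []

-- ===== PORT B =====
-- single pass: carry (running max, names attaining it)
def find_special_students_alt (scores : List (String × Int)) : List String :=
  match scores with
  | [] => []   -- unreachable: next(it) raises StopIteration here, excluded by Pre_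
  | (n0, s0) :: rest =>
    let st := rest.foldl
      (fun (st : Int × List String) p =>
        if p.2 > st.1 then (p.2, [p.1])
        else if p.2 == st.1 then (st.1, st.2 ++ [p.1])
        else st)
      (s0, [n0])
    if st.1 < 60 then [] else st.2

-- ===== PRECONDITION & SPEC =====
-- A raises StopIteration on the empty dict (so does B); Pre_ excludes exactly that input.
def Pre_find_special_students (scores : List (String × Int)) : Prop := scores ≠ []
instance (scores : List (String × Int)) : Decidable (Pre_find_special_students scores) := by unfold Pre_find_special_students; infer_instance
def pvWitness_find_special_students : (List (String × Int)) := [("alice", 72), ("bob", 72), ("carol", 60)]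

def Spec_find_special_students (scores : List (String × Int)) (out : List String) : Prop := out = find_special_students_alt scores
instance (scores : List (String × Int)) (out : List String) : Decidable (Spec_find_special_students scores out) := by unfold Spec_find_special_students; infer_instance

-- ===== CLAIM (what is proved, stated in full; the proofs are below) =====
def Claim_equal_find_special_students : Prop := ∀ (scores : List (String × Int)), Dom_find_special_students scores → Pre_find_special_students scores → Spec_find_special_students scores (find_special_students scores)

-- ===== LEMMAS AND PROOFS =====

-- A's max pass
def pvAmax (l : List (String × Int)) (m : Int) : Int :=
  l.foldl (fun mx p => if p.2 > mx then p.2 else mx) m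

lemma pvAmax_le (l : List (String × Int)) (m : Int) : m ≤ pvAmax l m := by
  induction l generalizing m with
  | nil => simp [pvAmax]
  | cons p t ih =>
    simp only [pvAmax, List.foldl] at *
    split_ifs with h
    · exact le_trans (le_of_lt h) (ih p.2)
    · exact ih m

-- A's collect pass over l with accumulator acc
lemma pvAcollect_acc (l : List (String × Int)) (M : Int) (acc : List String) :
    l.foldl (fun acc p => if p.2 == M then acc ++ [p.1] else acc) acc
      = acc ++ (l.filter (fun p => p.2 == M)).map Prod.fst := by
  induction l generalizing acc with
  | nil => simp
  | cons p t ih =>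
    rw [List.foldl_cons]
    by_cases h : (p.2 == M) = true
    · rw [if_pos h, ih]
      simp [h]
    · rw [if_neg h, ih]
      simp [h]

-- the single-pass fold of B computes (overall max, names attaining it)
lemma pvBfold_spec (l : List (String × Int)) (m : Int) (ms : List String) :
    l.foldl
      (fun (st : Int × List String) p =>
        if p.2 > st.1 then (p.2, [p.1])
        else if p.2 == st.1 then (st.1, st.2 ++ [p.1])
        else st)
      (m, ms)
    = (pvAmax l m,
       (if pvAmax l m > m then [] else ms)
         ++ (l.filter (fun p => p.2 == pvAmax l m)).map Prod.fst) := by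
  induction l generalizing m ms with
  | nil => simp [pvAmax]
  | cons p t ih =>
    have hM : pvAmax (p :: t) m = pvAmax t (if p.2 > m then p.2 else m) := by
      simp [pvAmax, List.foldl]
    by_cases h1 : p.2 > m
    · -- reset to (p.2, [p.1])
      have hstep : pvAmax (p :: t) m = pvAmax t p.2 := by simp [hM, h1]
      have hle : p.2 ≤ pvAmax t p.2 := pvAmax_le t p.2
      simp only [List.foldl, if_pos h1, ih, hstep, List.filter]
      by_cases h2 : pvAmax t p.2 > p.2
      · have hb : (p.2 == pvAmax t p.2) = false := by
          simp only [beq_eq_false_iff_ne, ne_eq]; omega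
        have hgt : pvAmax t p.2 > m := by omega
        simp [h2, hgt, hb]
      · have heq : p.2 = pvAmax t p.2 := by omega
        simp [← heq, h1]
    · by_cases h2 : p.2 = m
      · -- append name
        have hstep : pvAmax (p :: t) m = pvAmax t m := by simp [hM, h1]
        have hle : m ≤ pvAmax t m := pvAmax_le t m
        simp only [List.foldl, h2, if_pos (beq_self_eq_true m),
          ih, hstep, List.filter]
        by_cases h3 : pvAmax t m > m
        · have hb : (m == pvAmax t m) = false := by
            simp only [beq_eq_false_iff_ne, ne_eq]; omega
          simp [h3, hb]
        · have heq : m = pvAmax t m := by omega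
          simp [← heq]
      · -- skip
        have hstep : pvAmax (p :: t) m = pvAmax t m := by simp [hM, h1]
        have hle : m ≤ pvAmax t m := pvAmax_le t m
        have hb : (p.2 == pvAmax t m) = false := by
          simp only [beq_eq_false_iff_ne, ne_eq]; omega
        simp only [List.foldl, if_neg (by omega : ¬ p.2 > m), ih, hstep, List.filter]
        simp [h2, hb]

theorem find_special_students_eq_alt (scores : List (String × Int))
    (hp : Pre_find_special_students scores) :
    find_special_students scores = find_special_students_alt scores := by
  match scores with
  | [] => exact absurd rfl hp
  | (n0, s0) :: rest =>
    -- first lookup returns s0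
    have hget : ((((n0, s0) :: rest).lookup n0)).getD 0 = s0 := by
      simp [List.lookup]
    have hmax : pvAmax ((n0, s0) :: rest) s0 = pvAmax rest s0 := by
      simp [pvAmax, List.foldl]
    have hle : s0 ≤ pvAmax rest s0 := pvAmax_le rest s0
    have hA : find_special_students ((n0, s0) :: rest)
        = (if pvAmax ((n0, s0) :: rest) ((((n0, s0) :: rest).lookup n0).getD 0) < 60 then []
           else ((n0, s0) :: rest).foldl
             (fun acc p => if p.2 == pvAmax ((n0, s0) :: rest) ((((n0, s0) :: rest).lookup n0).getD 0)
                           then acc ++ [p.1] else acc) []) := rfl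
    have hB : find_special_students_alt ((n0, s0) :: rest)
        = (let st := rest.foldl
             (fun (st : Int × List String) p =>
               if p.2 > st.1 then (p.2, [p.1])
               else if p.2 == st.1 then (st.1, st.2 ++ [p.1])
               else st)
             (s0, [n0]);
           if st.1 < 60 then [] else st.2) := rfl
    rw [hA, hB, pvBfold_spec]
    simp only [hget, hmax]
    by_cases hlt : pvAmax rest s0 < 60
    · rw [if_pos hlt, if_pos hlt]
    · rw [if_neg hlt, if_neg hlt]
      rw [pvAcollect_acc]
      simp only [List.nil_append, List.filter_cons]
      by_cases h0 : s0 = pvAmax rest s0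
      · have hng : ¬ pvAmax rest s0 > s0 := by omega
        have hb : (s0 == pvAmax rest s0) = true := by simpa using h0
        simp [hb, hng]
      · have hg : pvAmax rest s0 > s0 := by omega
        have hb : (s0 == pvAmax rest s0) = false := by
          simp only [beq_eq_false_iff_ne, ne_eq]; omega
        simp [hb, hg]

-- ===== VERDICT (by name: the statement is the Claim_ definition above) =====
theorem find_special_students_spec : Claim_equal_find_special_students := by
  intro scores _ hp
  exact find_special_students_eq_alt scores hp
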